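-- pv_equiv track=rewrite | github.com/wedkarz02/krypto_ug | stegano/stegano.py | hide_message_in_typo_attributes
-- ===== SOURCE A (Python) =====
-- def hide_message_in_typo_attributes(content, bits):
--     modified_content = []
--     bit_index = 0
--     inside_p_tag = False
--
--     i = 0
--     while i < len(content):
--         if content[i:i+2] == '<p':
--             inside_p_tag = True
--             modified_content.append('<p')
--             i += 2
--         elif inside_p_tag and content[i] == '>':
--             if bit_index < len(bits):
--                 if bits[bit_index] == '1':
--                     modified_content.append(' style="lineheight: 100%"')
--                 else:
--                     modified_content.append(' style="margin-botom: 0cm"')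
--                 bit_index += 1
--             modified_content.append('>')
--             inside_p_tag = False
--             i += 1
--         else:
--             modified_content.append(content[i])
--             i += 1
--
--     if bit_index < len(bits):
--         raise ValueError("Not enough <p> tags to hide the message")
--
--     return ''.join(modified_content)
-- ===== SOURCE B (Python) =====
-- def hide_message_in_typo_attributes(content, bits):
--     out = []
--     rest = content
--     for bit in bits:
--         j = rest.find('<p')
--         if j == -1:
--             raise ValueError("Not enough <p> tags to hide the message")
--         mid = rest[j + 2:]
--         k = mid.find('>')
--         if k == -1:
--             raise ValueError("Not enough <p> tags to hide the message")
--         attr = ' style="lineheight: 100%"' if bit == '1' else ' style="margin-botom: 0cm"'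
--         out.append(rest[:j + 2])
--         out.append(mid[:k])
--         out.append(attr)
--         out.append('>')
--         rest = mid[k + 1:]
--     out.append(rest)
--     return ''.join(out)
-- ===== Notes on version B (the rewrite author's own statement) =====
-- stated objective: idiomatic
-- what changed: A's single char-by-char scan with an inside_p_tag flag is replaced by a per-bit loop that uses str.find to jump to the next '<p' and its closing '>' and splices the attribute in with slices.
import Mathlib
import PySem

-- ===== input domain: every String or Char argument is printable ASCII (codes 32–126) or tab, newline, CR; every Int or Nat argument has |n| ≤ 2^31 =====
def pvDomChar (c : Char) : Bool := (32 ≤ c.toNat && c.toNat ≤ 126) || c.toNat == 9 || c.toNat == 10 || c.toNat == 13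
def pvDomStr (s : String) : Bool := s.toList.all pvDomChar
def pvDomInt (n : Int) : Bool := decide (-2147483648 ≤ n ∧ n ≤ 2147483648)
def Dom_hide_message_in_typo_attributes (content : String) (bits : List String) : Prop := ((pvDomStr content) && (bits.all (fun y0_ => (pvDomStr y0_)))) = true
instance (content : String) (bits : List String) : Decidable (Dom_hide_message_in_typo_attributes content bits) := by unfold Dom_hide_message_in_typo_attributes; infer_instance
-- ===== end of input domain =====

-- B replaces A's char-by-char scan with an inside_p_tag flag by a per-bit loop that jumps
-- with str.find to the next '<p' and its closing '>' (objective: idiomatic / alternative).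
-- Equal return values proved; both raise ValueError when there are fewer tags than bits
-- (excluded by Pre_).

-- the two style attributes, as lists of code points (shared string constants)
def pvAttr1 : List Char := " style=\"lineheight: 100%\"".toList
def pvAttr0 : List Char := " style=\"margin-botom: 0cm\"".toList

-- ===== PORT A =====
-- literal port of A's while-loop: state = remaining characters, bit_index, inside_p_tag,
-- modified_content (list of pieces; ''.join at the end = flatten).
-- 'content[i:i+2] == "<p"' on the remaining list is 'c = '<' and next char = 'p''.
-- On the inputs excluded by Pre_ the Python raises ValueError after the loop; the port
-- just returns the joined pieces there (outside the claim).
def pvGoA (bits : List String) : List Char → Nat → Bool → List (List Char) → List Char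
  | [], _, _, acc => acc.flatten
  | c :: rest, bi, inside, acc =>
    if c = '<' ∧ rest.head? = some 'p' then
      pvGoA bits rest.tail bi true (acc ++ [['<', 'p']])
    else if inside ∧ c = '>' then
      if bi < bits.length then
        pvGoA bits rest (bi + 1) false
          (acc ++ [(if bits.getD bi "" = "1" then pvAttr1 else pvAttr0), ['>']])
      else
        pvGoA bits rest bi false (acc ++ [['>']])
    else
      pvGoA bits rest bi inside (acc ++ [[c]])
termination_by cs => cs.length
decreasing_by
  all_goals (simp [List.length_tail]; try omega)

def hide_message_in_typo_attributes (content : String) (bits : List String) : String :=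
  String.ofList (pvGoA bits content.toList 0 false [])

-- ===== PORT B =====
-- literal port of Source B: a for-loop over bits; rest.find('<p') / mid.find('>') are
-- PySem.Chars.find; rest[:j+2], rest[j+2:], mid[:k], mid[k+1:] are PySem.List.slice;
-- where Source B raises ValueError the port returns the pieces joined so far (outside the claim).
def pvGoB : List String → List Char → List (List Char) → List Char
  | [], rest, acc => (acc ++ [rest]).flatten
  | bit :: bs, rest, acc =>
    let j := PySem.Chars.find rest ['<', 'p']
    if j = -1 then acc.flatten    -- raise ValueError
    else
      let mid := PySem.List.slice rest (some (j + 2)) none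
      let k := PySem.Chars.find mid ['>']
      if k = -1 then acc.flatten  -- raise ValueError
      else
        pvGoB bs (PySem.List.slice mid (some (k + 1)) none)
          (acc ++ [PySem.List.slice rest none (some (j + 2)),
                   PySem.List.slice mid none (some k),
                   (if bit = "1" then pvAttr1 else pvAttr0), ['>']])

def hide_message_in_typo_attributes_alt (content : String) (bits : List String) : String :=
  String.ofList (pvGoB bits content.toList [])

-- ===== PRECONDITION & SPEC =====
-- pvTagCount content inside = the number of places a bit can be hidden: the '>'s that
-- close a '<p' group, scanning left to right (inside = currently between a '<p' and its '>').
def pvTagCount : List Char → Bool → Nat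
  | [], _ => 0
  | '<' :: 'p' :: rest, _ => pvTagCount rest true
  | c :: rest, inside => if inside ∧ c = '>' then 1 + pvTagCount rest false else pvTagCount rest inside

-- Pre_ excludes exactly the inputs where Python A raises ValueError
-- ("Not enough <p> tags to hide the message"); B raises the same error there.
def Pre_hide_message_in_typo_attributes (content : String) (bits : List String) : Prop :=
  bits.length ≤ pvTagCount content.toList false
instance (content : String) (bits : List String) : Decidable (Pre_hide_message_in_typo_attributes content bits) := by unfold Pre_hide_message_in_typo_attributes; infer_instance

def pvWitness_hide_message_in_typo_attributes : String × List String := ("<p class=\"x\">hi</p>", ["1"])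

def Spec_hide_message_in_typo_attributes (content : String) (bits : List String) (out : String) : Prop := out = hide_message_in_typo_attributes_alt content bits
instance (content : String) (bits : List String) (out : String) : Decidable (Spec_hide_message_in_typo_attributes content bits out) := by unfold Spec_hide_message_in_typo_attributes; infer_instance

-- ===== CLAIM (what is proved, stated in full; the proofs are below) =====
def Claim_equal_hide_message_in_typo_attributes : Prop := ∀ (content : String) (bits : List String), Dom_hide_message_in_typo_attributes content bits → Pre_hide_message_in_typo_attributes content bits → Spec_hide_message_in_typo_attributes content bits (hide_message_in_typo_attributes content bits)

-- ===== LEMMAS AND PROOFS =====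

-- accumulator-free companions of the two loops
def pvFA (bits : List String) : List Char → Nat → Bool → List Char
  | [], _, _ => []
  | c :: rest, bi, inside =>
    if c = '<' ∧ rest.head? = some 'p' then
      ['<', 'p'] ++ pvFA bits rest.tail bi true
    else if inside ∧ c = '>' then
      if bi < bits.length then
        (if bits.getD bi "" = "1" then pvAttr1 else pvAttr0) ++ ['>'] ++ pvFA bits rest (bi + 1) false
      else ['>'] ++ pvFA bits rest bi false
    else [c] ++ pvFA bits rest bi inside
termination_by cs => cs.length
decreasing_by
  all_goals (simp [List.length_tail]; try omega)

def pvFB : List String → List Char → List Char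
  | [], rest => rest
  | bit :: bs, rest =>
    let j := PySem.Chars.find rest ['<', 'p']
    if j = -1 then []
    else
      let mid := rest.drop (j.toNat + 2)
      let k := PySem.Chars.find mid ['>']
      if k = -1 then []
      else
        rest.take (j.toNat + 2) ++ mid.take k.toNat ++
          (if bit = "1" then pvAttr1 else pvAttr0) ++ ['>'] ++ pvFB bs (mid.drop (k.toNat + 1))

theorem pvGoA_eq (bits : List String) :
    ∀ cs bi inside acc, pvGoA bits cs bi inside acc = acc.flatten ++ pvFA bits cs bi inside := by
  intro cs bi inside acc
  fun_induction pvGoA bits cs bi inside acc <;> (rw [pvFA]; (try simp_all); (try (split_ifs <;> simp_all)))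

theorem pvGoB_eq : ∀ bs rest acc, pvGoB bs rest acc = acc.flatten ++ pvFB bs rest := by
  intro bs
  induction bs with
  | nil => intro rest acc; simp [pvGoB, pvFB]
  | cons bit bs ih =>
    intro rest acc
    rw [pvGoB, pvFB]
    by_cases hj : PySem.Chars.find rest ['<', 'p'] = -1
    · simp [hj]
    · have hj0 : 0 ≤ PySem.Chars.find rest ['<', 'p'] := by
        have := PySem.Chars.neg_one_le_find rest ['<', 'p']; omega
      simp only [hj, if_false]
      rw [PySem.List.slice_from rest (by omega), PySem.List.slice_to rest (by omega)]
      have htn : (PySem.Chars.find rest ['<', 'p'] + 2).toNat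
          = (PySem.Chars.find rest ['<', 'p']).toNat + 2 := by omega
      rw [htn]
      set mid := rest.drop ((PySem.Chars.find rest ['<', 'p']).toNat + 2) with hmid
      by_cases hk : PySem.Chars.find mid ['>'] = -1
      · simp [hk]
      · have hk0 : 0 ≤ PySem.Chars.find mid ['>'] := by
          have := PySem.Chars.neg_one_le_find mid ['>']; omega
        simp only [hk, if_false]
        rw [PySem.List.slice_from mid (by omega), PySem.List.slice_to mid (by omega)]
        have hkn : (PySem.Chars.find mid ['>'] + 1).toNat
            = (PySem.Chars.find mid ['>']).toNat + 1 := by omega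
        rw [hkn, ih]
        simp

-- A copies everything verbatim once the bits are used up
theorem pvFA_verbatim (bits : List String) :
    ∀ cs bi inside, bits.length ≤ bi → pvFA bits cs bi inside = cs := by
  intro cs bi inside h
  fun_induction pvFA bits cs bi inside <;> simp_all
  · rename_i c rest bi inside hc ih
    obtain ⟨rfl, hh⟩ := hc
    cases rest with
    | nil => simp at hh
    | cons p t => simp at hh; subst hh; simp_all
  · omega

theorem pvPrefixTwo (c : Char) (rest : List Char) (a b : Char) :
    [a, b] <+: c :: rest ↔ c = a ∧ rest.head? = some b := by
  cases rest <;> simp [List.cons_prefix_cons, eq_comm]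

theorem pvPrefixOne (c : Char) (rest : List Char) (a : Char) :
    [a] <+: c :: rest ↔ c = a := by
  simp [List.cons_prefix_cons, eq_comm]

-- outside a tag, A copies up to the first '<p' verbatim and enters the tag
theorem pvFA_out_decomp (bits : List String) :
    ∀ j cs bi, ['<', 'p'] <+: cs.drop j → (∀ i < j, ¬ ['<', 'p'] <+: cs.drop i) →
      pvFA bits cs bi false = cs.take j ++ ['<', 'p'] ++ pvFA bits (cs.drop (j + 2)) bi true := by
  intro j
  induction j with
  | zero =>
    intro cs bi hpre _
    simp only [List.drop_zero] at hpre
    obtain ⟨t, rfl⟩ := hpre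
    simp only [List.cons_append, List.nil_append]
    rw [pvFA]; simp
  | succ j ih =>
    intro cs bi hpre hmin
    cases cs with
    | nil => simp at hpre
    | cons c rest =>
      have h0 : ¬ (c = '<' ∧ rest.head? = some 'p') := by
        rw [← pvPrefixTwo]
        simpa using hmin 0 (by omega)
      rw [pvFA]
      simp only [h0, if_false, false_and, Bool.false_eq_true]
      rw [ih rest bi (by simpa using hpre) (fun i hi => by simpa using hmin (i + 1) (by omega))]
      simp

-- inside a tag, A copies up to the first '>' verbatim, inserts the attribute, and leaves
theorem pvFA_in_decomp (bits : List String) :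
    ∀ k cs bi, bi < bits.length → ['>'] <+: cs.drop k → (∀ i < k, ¬ ['>'] <+: cs.drop i) →
      pvFA bits cs bi true = cs.take k ++ (if bits.getD bi "" = "1" then pvAttr1 else pvAttr0)
        ++ ['>'] ++ pvFA bits (cs.drop (k + 1)) (bi + 1) false := by
  intro k
  induction k using Nat.strong_induction_on with
  | _ k ih =>
    intro cs bi hbi hpre hmin
    cases cs with
    | nil => simp at hpre
    | cons c rest =>
      by_cases hk0 : k = 0
      · subst hk0
        simp only [List.drop_zero, pvPrefixOne] at hpre
        subst hpre
        rw [pvFA]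
        simp [hbi]
      · have hcne : c ≠ '>' := fun h => (hmin 0 (by omega)) (by simp [h])
        by_cases hc : c = '<' ∧ rest.head? = some 'p'
        · obtain ⟨rfl, hh⟩ := hc
          cases rest with
          | nil => simp at hh
          | cons p t =>
            simp only [List.head?_cons, Option.some.injEq] at hh
            subst hh
            have hk1 : k ≠ 1 := by
              intro h1; subst h1
              simp at hpre
            obtain ⟨m, rfl⟩ : ∃ m, k = m + 2 := ⟨k - 2, by omega⟩
            rw [pvFA]
            simp only [List.head?_cons, and_self, if_true, List.tail_cons, true_and]
            rw [ih m (by omega) t bi hbi (by simpa using hpre)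
              (fun i hi => by simpa using hmin (i + 2) (by omega))]
            simp
        · rw [pvFA]
          simp only [hc, if_false, hcne, and_false]
          obtain ⟨m, rfl⟩ : ∃ m, k = m + 1 := ⟨k - 1, by omega⟩
          rw [ih m (by omega) rest bi hbi (by simpa using hpre)
            (fun i hi => by simpa using hmin (i + 1) (by omega))]
          simp

theorem pvTagCount_cons (c : Char) (rest : List Char) (inside : Bool) :
    pvTagCount (c :: rest) inside =
      if c = '<' ∧ rest.head? = some 'p' then pvTagCount rest.tail true
      else if inside ∧ c = '>' then 1 + pvTagCount rest false
      else pvTagCount rest inside := by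
  by_cases hc : c = '<' ∧ rest.head? = some 'p'
  · obtain ⟨rfl, hh⟩ := hc
    cases rest with
    | nil => simp at hh
    | cons p t => simp at hh; subst hh; simp [pvTagCount]
  · rw [if_neg hc]
    rcases rest with _ | ⟨p, t⟩ <;> (rw [pvTagCount.eq_3]; simp_all)

theorem pvCount_none_out : ∀ cs : List Char, ¬ ['<', 'p'] <:+: cs → pvTagCount cs false = 0 := by
  intro cs h
  induction cs with
  | nil => rfl
  | cons c rest ih =>
    rw [pvTagCount_cons]
    have hc : ¬ (c = '<' ∧ rest.head? = some 'p') := by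
      rw [← pvPrefixTwo]
      exact fun hp => h hp.isInfix
    simp only [hc, if_false, false_and, Bool.false_eq_true]
    exact ih (fun hi => h (List.infix_cons hi))

theorem pvCount_none_in (cs : List Char) (h : '>' ∉ cs) (inside : Bool) :
    pvTagCount cs inside = 0 := by
  fun_induction pvTagCount cs inside <;> simp_all

theorem pvCount_out_decomp :
    ∀ (j : Nat) (cs : List Char), ['<', 'p'] <+: cs.drop j → (∀ i < j, ¬ ['<', 'p'] <+: cs.drop i) →
      pvTagCount cs false = pvTagCount (cs.drop (j + 2)) true := by
  intro j
  induction j with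
  | zero =>
    intro cs hpre _
    simp only [List.drop_zero] at hpre
    obtain ⟨t, rfl⟩ := hpre
    simp [pvTagCount]
  | succ j ih =>
    intro cs hpre hmin
    cases cs with
    | nil => simp at hpre
    | cons c rest =>
      have h0 : ¬ (c = '<' ∧ rest.head? = some 'p') := by
        rw [← pvPrefixTwo]
        simpa using hmin 0 (by omega)
      rw [pvTagCount_cons]
      simp only [h0, if_false, false_and, Bool.false_eq_true]
      rw [ih rest (by simpa using hpre) (fun i hi => by simpa using hmin (i + 1) (by omega))]
      simp

theorem pvCount_in_decomp :
    ∀ (k : Nat) (cs : List Char), ['>'] <+: cs.drop k → (∀ i < k, ¬ ['>'] <+: cs.drop i) →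
      pvTagCount cs true = 1 + pvTagCount (cs.drop (k + 1)) false := by
  intro k
  induction k using Nat.strong_induction_on with
  | _ k ih =>
    intro cs hpre hmin
    cases cs with
    | nil => simp at hpre
    | cons c rest =>
      by_cases hk0 : k = 0
      · subst hk0
        simp only [List.drop_zero, pvPrefixOne] at hpre
        subst hpre
        rw [pvTagCount_cons]
        simp
      · have hcne : c ≠ '>' := fun h => (hmin 0 (by omega)) (by simp [h])
        by_cases hc : c = '<' ∧ rest.head? = some 'p'
        · obtain ⟨rfl, hh⟩ := hc
          cases rest with
          | nil => simp at hh
          | cons p t =>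
            simp only [List.head?_cons, Option.some.injEq] at hh
            subst hh
            have hk1 : k ≠ 1 := by
              intro h1; subst h1
              simp at hpre
            obtain ⟨m, rfl⟩ : ∃ m, k = m + 2 := ⟨k - 2, by omega⟩
            rw [pvTagCount_cons]
            simp only [List.head?_cons, and_self, if_true, List.tail_cons, true_and]
            rw [ih m (by omega) t (by simpa using hpre)
              (fun i hi => by simpa using hmin (i + 2) (by omega))]
            simp
        · rw [pvTagCount_cons]
          simp only [hc, if_false, hcne, and_false]
          obtain ⟨m, rfl⟩ : ∃ m, k = m + 1 := ⟨k - 1, by omega⟩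
          rw [ih m (by omega) rest (by simpa using hpre)
            (fun i hi => by simpa using hmin (i + 1) (by omega))]
          simp

theorem pvMain (bits : List String) :
    ∀ cs bi, bits.length - bi ≤ pvTagCount cs false →
      pvFA bits cs bi false = pvFB (bits.drop bi) cs := by
  suffices H : ∀ n cs bi, cs.length ≤ n → bits.length - bi ≤ pvTagCount cs false →
      pvFA bits cs bi false = pvFB (bits.drop bi) cs from
    fun cs bi h => H cs.length cs bi le_rfl h
  intro n
  induction n using Nat.strong_induction_on with
  | _ n ih =>
    intro cs bi hlen hcount
    rcases hdrop : bits.drop bi with _ | ⟨bit, bs⟩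
    · have hle : bits.length ≤ bi := by
        by_contra hlt
        exact absurd hdrop (by simp [List.drop_eq_nil_iff]; omega)
      rw [pvFA_verbatim bits cs bi false hle, pvFB]
    · have hbi : bi < bits.length := by
        by_contra hlt
        rw [List.drop_eq_nil_iff.mpr (by omega)] at hdrop
        exact absurd hdrop (by simp)
      by_cases hj : PySem.Chars.find cs ['<', 'p'] = -1
      · have h0 : pvTagCount cs false = 0 :=
          pvCount_none_out cs ((PySem.Chars.find_eq_neg_one_iff cs ['<', 'p']).mp hj)
        omega
      · have hj0 : 0 ≤ PySem.Chars.find cs ['<', 'p'] := by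
          have := PySem.Chars.neg_one_le_find cs ['<', 'p']; omega
        obtain ⟨hjpre, hjmin⟩ := PySem.Chars.find_spec hj0
        set jn := (PySem.Chars.find cs ['<', 'p']).toNat with hjn
        set mid := cs.drop (jn + 2) with hmid
        have hcs2 : 2 ≤ cs.length := by
          have hinf : ['<', 'p'] <:+: cs := by
            by_contra hc
            exact hj ((PySem.Chars.find_eq_neg_one_iff cs ['<', 'p']).mpr hc)
          simpa using hinf.length_le
        have hout : pvTagCount cs false = pvTagCount mid true := by
          rw [hmid]
          exact pvCount_out_decomp jn cs hjpre hjmin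
        by_cases hk : PySem.Chars.find mid ['>'] = -1
        · have hnin : '>' ∉ mid := by
            have := (PySem.Chars.find_eq_neg_one_iff mid ['>']).mp hk
            intro hm
            obtain ⟨sl, tl, he⟩ := List.mem_iff_append.mp hm
            exact this ⟨sl, tl, by rw [he]; simp⟩
          have h0 : pvTagCount mid true = 0 := pvCount_none_in mid hnin true
          omega
        · have hk0 : 0 ≤ PySem.Chars.find mid ['>'] := by
            have := PySem.Chars.neg_one_le_find mid ['>']; omega
          obtain ⟨hkpre, hkmin⟩ := PySem.Chars.find_spec hk0
          set kn := (PySem.Chars.find mid ['>']).toNat with hkn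
          have hin : pvTagCount mid true = 1 + pvTagCount (mid.drop (kn + 1)) false :=
            pvCount_in_decomp kn mid hkpre hkmin
          have hcount' : bits.length - (bi + 1) ≤ pvTagCount (mid.drop (kn + 1)) false := by
            omega
          rw [pvFA_out_decomp bits jn cs bi hjpre hjmin, ← hmid,
            pvFA_in_decomp bits kn mid bi hbi hkpre hkmin,
            ih ((mid.drop (kn + 1)).length) (by
              have : mid.length ≤ cs.length - 2 := by simp [hmid]; omega
              simp only [List.length_drop]
              omega) (mid.drop (kn + 1)) (bi + 1) le_rfl hcount']
          have htake : cs.take (jn + 2) = cs.take jn ++ ['<', 'p'] := by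
            obtain ⟨t, ht⟩ := hjpre
            rw [List.take_add, ← ht]
            simp
          have hget : bits.getD bi "" = bit := by
            have hsome : bits[bi]? = some bit := by
              have h0 : (bits.drop bi)[0]? = bits[bi + 0]? := List.getElem?_drop ..
              rw [hdrop] at h0
              simpa using h0.symm
            simp [List.getD_eq_getElem?_getD, hsome]
          have hdropsucc : bits.drop (bi + 1) = bs := by
            have hdd : List.drop 1 (List.drop bi bits) = List.drop (bi + 1) bits :=
              List.drop_drop
            rw [← hdd, hdrop]
            simp
          rw [pvFB]
          simp only [hj, if_false, hk, ← hjn, ← hmid, ← hkn, hget, hdropsucc, htake]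
          simp [List.append_assoc]

-- ===== VERDICT (by name: the statement is the Claim_ definition above) =====
theorem hide_message_in_typo_attributes_spec : Claim_equal_hide_message_in_typo_attributes := by
  intro content bits _ hpre
  unfold Spec_hide_message_in_typo_attributes hide_message_in_typo_attributes hide_message_in_typo_attributes_alt
  rw [pvGoA_eq, pvGoB_eq]
  have := pvMain bits content.toList 0 (by simpa using hpre)
  simp [this]
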